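-- pv_equiv track=rewrite | github.com/C4ssinelli/Faculdade | Iniciação_Científica/Pre_Codificacao.py | Separa_String
-- ===== SOURCE A (Python) =====
-- def Separa_String(Convertido):
--     contador = 1
--     Codigo = []
--     Caracteres = ""
--     for i in range(len(Convertido)):
--         Caracteres = Caracteres + Convertido[i]
--         contador += 1
--         if contador == 3:
--             Codigo.append(int(Caracteres))
--             Caracteres = ""
--             contador = 1
--     return Codigo
-- ===== SOURCE B (Python) =====
-- def Separa_String(Convertido):
--     return [int(Convertido[i:i + 2]) for i in range(0, len(Convertido) - 1, 2)]
-- ===== Notes on version B (the rewrite author's own statement) =====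
-- stated objective: simpler
-- what changed: Replaces the per-character loop with its running buffer and 1..3 counter by a single stride-2 comprehension over chunk start indices, slicing two characters at a time (the len-1 bound drops an odd trailing character exactly as A does).
import Mathlib
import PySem

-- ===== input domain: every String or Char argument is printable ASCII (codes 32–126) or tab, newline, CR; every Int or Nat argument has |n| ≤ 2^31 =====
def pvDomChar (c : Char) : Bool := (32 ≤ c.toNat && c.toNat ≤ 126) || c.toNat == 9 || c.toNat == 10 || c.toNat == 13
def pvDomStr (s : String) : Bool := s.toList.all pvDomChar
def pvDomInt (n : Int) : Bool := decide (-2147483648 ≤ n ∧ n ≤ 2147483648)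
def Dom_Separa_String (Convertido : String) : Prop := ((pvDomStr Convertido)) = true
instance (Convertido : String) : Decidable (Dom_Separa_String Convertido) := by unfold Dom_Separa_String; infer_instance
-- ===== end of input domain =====

-- B replaces A's per-character buffer-and-counter loop by a stride-2 comprehension over chunk
-- start indices (objective: simpler). Under Pre_ every int() succeeds, so '(… ).getD 0' never fires.

-- ===== PORT A =====
-- state = (contador, Codigo, Caracteres); the for-loop over the characters is a foldl over them.
def Separa_String (Convertido : String) : List Int :=
  let r := Convertido.toList.foldl
    (fun (st : Int × List Int × List Char) c =>
      let Caracteres := st.2.2 ++ [c]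
      let contador := st.1 + 1
      if contador = 3 then
        (1, st.2.1 ++ [(PySem.Int.ofChars? Caracteres).getD 0], [])
      else
        (contador, st.2.1, Caracteres))
    (1, [], [])
  r.2.1

-- ===== PORT B =====
def Separa_String_alt (Convertido : String) : List Int :=
  (PySem.List.pyRange 0 (PySem.Str.len Convertido - 1) 2).map
    (fun i => (PySem.Int.ofStr? (PySem.Str.slice Convertido (some i) (some (i + 2)))).getD 0)

-- ===== PRECONDITION & SPEC =====
-- Pre_ excludes exactly the inputs where A raises ValueError: some 2-character chunk is not a
-- valid int() literal.
def Pre_Separa_String (Convertido : String) : Prop :=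
  ((List.range (Convertido.toList.length / 2)).all
    (fun k => (PySem.Int.ofChars? ((Convertido.toList.drop (2 * k)).take 2)).isSome)) = true
instance (Convertido : String) : Decidable (Pre_Separa_String Convertido) := by
  unfold Pre_Separa_String; infer_instance
def pvWitness_Separa_String : String := "1234"

def Spec_Separa_String (Convertido : String) (out : List Int) : Prop := out = Separa_String_alt Convertido
instance (Convertido : String) (out : List Int) : Decidable (Spec_Separa_String Convertido out) := by unfold Spec_Separa_String; infer_instance

-- ===== CLAIM (what is proved, stated in full; the proofs are below) =====
def Claim_equal_Separa_String : Prop := ∀ (Convertido : String), Dom_Separa_String Convertido → Pre_Separa_String Convertido → Spec_Separa_String Convertido (Separa_String Convertido)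

-- ===== LEMMAS AND PROOFS =====

-- the common value of both programs: the string's characters two at a time
def pvChunks : List Char → List Int
  | a :: b :: rest => (PySem.Int.ofChars? [a, b]).getD 0 :: pvChunks rest
  | _ => []

lemma foldA_chunks : ∀ (cs : List Char) (acc : List Int),
    (cs.foldl
      (fun (st : Int × List Int × List Char) c =>
        let Caracteres := st.2.2 ++ [c]
        let contador := st.1 + 1
        if contador = 3 then
          (1, st.2.1 ++ [(PySem.Int.ofChars? Caracteres).getD 0], [])
        else
          (contador, st.2.1, Caracteres))
      (1, acc, [])).2.1 = acc ++ pvChunks cs := by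
  intro cs
  induction cs using pvChunks.induct with
  | case1 a b rest ih =>
      intro acc
      simp [List.foldl, pvChunks, ih]
  | case2 cs h =>
      rcases cs with _ | ⟨a, _ | ⟨b, r⟩⟩
      · intro acc; simp [pvChunks]
      · intro acc; simp [List.foldl, pvChunks]
      · exact (h a b r rfl).elim

lemma mapB_chunks : ∀ (cs : List Char),
    (PySem.List.pyRange 0 ((cs.length : Int) - 1) 2).map
      (fun i => (PySem.Int.ofChars? (PySem.Chars.slice cs (some i) (some (i + 2)))).getD 0)
      = pvChunks cs := by
  intro cs
  induction cs using pvChunks.induct with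
  | case1 a b rest ih =>
      rw [PySem.List.pyRange_of_pos _ _ (by norm_num)] at ih ⊢
      simp only [List.length_cons]
      have hcnt :
          (if (0 : Int) < ↑(rest.length + 1 + 1) - 1 then
              (((↑(rest.length + 1 + 1) : Int) - 1 - 0 + 2 - 1) / 2).toNat else 0)
            = (if (0 : Int) < ↑rest.length - 1 then
                (((↑rest.length : Int) - 1 - 0 + 2 - 1) / 2).toNat else 0) + 1 := by
        split_ifs <;> omega
      rw [hcnt, List.range_succ_eq_map]
      simp only [List.map_cons, List.map_map, pvChunks, List.cons.injEq]
      refine ⟨?_, ?_⟩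
      · have h0 : (0 : Int) + 2 * ((0 : Nat) : Int) = ((0 : Nat) : Int) := by norm_num
        have h2 : ((0 : Nat) : Int) + 2 = ((2 : Nat) : Int) := by norm_num
        rw [h0, h2]
        simp only [PySem.Chars.slice]
        rw [PySem.List.slice_natCast]
        simp
      · rw [← ih, List.map_map]
        apply List.map_congr_left
        intro k hk
        simp only [Function.comp_apply]
        have h1 : (0 : Int) + 2 * ↑(Nat.succ k) = ((2 * k + 2 : Nat) : Int) := by push_cast; ring
        have h2 : (0 : Int) + 2 * ↑k = ((2 * k : Nat) : Int) := by push_cast; ring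
        rw [h1, h2]
        congr 1
        have e1 : ((2 * k + 2 : Nat) : Int) + 2 = ((2 * k + 4 : Nat) : Int) := by push_cast; ring
        have e2 : ((2 * k : Nat) : Int) + 2 = ((2 * k + 2 : Nat) : Int) := by push_cast; ring
        simp only [PySem.Chars.slice]
        rw [e1, e2, PySem.List.slice_natCast, PySem.List.slice_natCast]
        have h3 : List.drop (2 * k + 2) (a :: b :: rest) = List.drop (2 * k) rest := by
          rw [show 2 * k + 2 = (2 * k).succ.succ from rfl]
          simp [List.drop_succ_cons]
        have h4 : 2 * k + 4 - (2 * k + 2) = 2 * k + 2 - 2 * k := by omega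
        rw [h3, h4]
  | case2 cs h =>
      rcases cs with _ | ⟨a, _ | ⟨b, r⟩⟩
      · simp [pvChunks]; decide
      · simp [pvChunks]; decide
      · exact (h a b r rfl).elim

-- ===== VERDICT (by name: the statement is the Claim_ definition above) =====
theorem Separa_String_spec : Claim_equal_Separa_String := by
  intro s _ _
  unfold Spec_Separa_String Separa_String Separa_String_alt
  have hB := mapB_chunks s.toList
  have hA := foldA_chunks s.toList []
  simp only [] at hA ⊢
  rw [hA, List.nil_append, ← hB]
  apply List.map_congr_left
  intro i _
  congr 1
  simp [PySem.Str.slice, PySem.Int.ofStr?]
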